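-- pv_equiv track=rewrite | github.com/gabriel-p-artcls/23-08_UCC | 1_code/2_UCC_id_assign.py | assign_fname
-- ===== SOURCE A (Python) =====
-- def assign_fname(all_names):
--     """
--     Assign names used for files and urls
--     """
--     fnames = []
--     for names in all_names:
--         names = names.split(',')
--         names_temp = []
--         for name in names:
--             name = name.strip()
--             # We replace '+' with 'p' to avoid duplicating names for clusters
--             # like 'Juchert J0644.8-0925' and 'Juchert_J0644.8+0925'
--             name = name.lower().replace('_', '').replace(' ', '').replace(
--                 '-', '').replace('.', '').replace('+', 'p')
--             names_temp.append(name)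
--
--         fname = preferred_names(names_temp)
--
--         fnames.append(fname)
--
--     return fnames
--
-- def preferred_names(names_temp):
--     """
--     Use naming conventions according to this list of preferred names
--     """
--     names_lst = (
--         'blanco', 'ngc', 'melotte', 'trumpler', 'ruprecht', 'berkeley',
--         'pismis', 'vdbh', 'loden', 'kronberger', 'collinder', 'harvard',
--         'eso', 'ascc')
--
--     fname = names_temp[0]
--     if len(names_temp) > 1:
--         for id_prefer in names_lst:
--             for name in names_temp:
--                 if id_prefer in name:
--                     fname = name
--                     return fname
--     return fname
-- ===== SOURCE B (Python) =====
-- _NAMES_LST = (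
--     'blanco', 'ngc', 'melotte', 'trumpler', 'ruprecht', 'berkeley',
--     'pismis', 'vdbh', 'loden', 'kronberger', 'collinder', 'harvard',
--     'eso', 'ascc')
--
--
-- def _normalize(name):
--     name = name.strip()
--     return name.lower().replace('_', '').replace(' ', '').replace(
--         '-', '').replace('.', '').replace('+', 'p')
--
--
-- def _priority(name):
--     """Smallest index of a preferred prefix contained in name, else len."""
--     p = 0
--     for pref in _NAMES_LST:
--         if pref in name:
--             return p
--         p += 1
--     return p
--
--
-- def assign_fname(all_names):
--     """
--     Assign names used for files and urls
--     """
--     fnames = []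
--     for names in all_names:
--         temp = [_normalize(n) for n in names.split(',')]
--         best, best_p = temp[0], _priority(temp[0])
--         for name in temp[1:]:
--             p = _priority(name)
--             if p < best_p:
--                 best, best_p = name, p
--         fnames.append(best)
--     return fnames
-- ===== Notes on version B (the rewrite author's own statement) =====
-- stated objective: alternative
-- what changed: The preference selection loops once over the normalized names, keeping the name with the smallest matching-prefix index (strict < for first-wins ties), instead of A's nested loops over the preferred-prefix list with an early return; the outer append-loop becomes a comprehension.
import Mathlib
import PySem

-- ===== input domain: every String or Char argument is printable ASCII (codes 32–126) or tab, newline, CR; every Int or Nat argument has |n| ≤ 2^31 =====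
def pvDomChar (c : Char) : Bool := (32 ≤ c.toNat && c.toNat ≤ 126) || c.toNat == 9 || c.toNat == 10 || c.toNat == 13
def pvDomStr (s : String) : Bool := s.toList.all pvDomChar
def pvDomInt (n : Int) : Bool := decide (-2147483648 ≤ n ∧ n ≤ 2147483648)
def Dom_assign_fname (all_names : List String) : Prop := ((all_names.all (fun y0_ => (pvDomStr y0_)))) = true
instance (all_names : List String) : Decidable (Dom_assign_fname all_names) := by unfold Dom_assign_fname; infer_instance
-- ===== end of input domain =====

-- B replaces A's nested prefix-then-name search (early return) by one pass over the
-- names keeping the name with the smallest matching-prefix index; same results.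

-- ===== PORT A =====
def pvNamesLst : List String :=
  ["blanco", "ngc", "melotte", "trumpler", "ruprecht", "berkeley",
   "pismis", "vdbh", "loden", "kronberger", "collinder", "harvard",
   "eso", "ascc"]

-- the normalization chain shared verbatim by both Pythons
def pvNormalize (name : String) : String :=
  let name := PySem.Str.strip name
  PySem.Str.replace (PySem.Str.replace (PySem.Str.replace (PySem.Str.replace
    (PySem.Str.replace (PySem.Str.lower name) "_" "") " " "") "-" "") "." "") "+" "p"

-- inner loop of preferred_names: first name containing id_prefer, with early return
def pvFindName (p : String) : List String → Option String
  | [] => none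
  | n :: ns => if PySem.Str.isIn p n then some n else pvFindName p ns

-- outer loop over the preferred-prefix list
def pvSearch : List String → List String → Option String
  | [], _ => none
  | p :: ps, ns =>
    match pvFindName p ns with
    | some n => some n
    | none => pvSearch ps ns

def pvPreferred (names_temp : List String) : String :=
  match names_temp with
  | [] => ""   -- unreachable: Python split(',') always yields a nonempty list
  | h :: _ =>
    if names_temp.length > 1 then (pvSearch pvNamesLst names_temp).getD h else h

def assign_fname (all_names : List String) : List String :=
  all_names.foldl (fun fnames names =>
    fnames ++ [pvPreferred ((((PySem.Str.split? names ",").getD []).foldl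
      (fun acc name => acc ++ [pvNormalize name]) []))]) []

-- ===== PORT B =====
-- _priority: index of the first preferred prefix contained in name, else the length
def pvPrioGo (name : String) : List String → Nat → Nat
  | [], p => p
  | pref :: rest, p => if PySem.Str.isIn pref name then p else pvPrioGo name rest (p + 1)

def pvPriority (name : String) : Nat := pvPrioGo name pvNamesLst 0

def pvBestStep (acc : String × Nat) (name : String) : String × Nat :=
  let p := pvPriority name
  if p < acc.2 then (name, p) else acc

def pvPreferredAlt (temp : List String) : String :=
  match temp with
  | [] => ""   -- unreachable: Python split(',') always yields a nonempty list
  | h :: t => (t.foldl pvBestStep (h, pvPriority h)).1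

def assign_fname_alt (all_names : List String) : List String :=
  all_names.map (fun names => pvPreferredAlt (((PySem.Str.split? names ",").getD []).map pvNormalize))

-- ===== PRECONDITION & SPEC =====
def Spec_assign_fname (all_names : List String) (out : List String) : Prop := out = assign_fname_alt all_names
instance (all_names : List String) (out : List String) : Decidable (Spec_assign_fname all_names out) := by unfold Spec_assign_fname; infer_instance

-- ===== CLAIM (what is proved, stated in full; the proofs are below) =====
def Claim_equal_assign_fname : Prop := ∀ (all_names : List String), Dom_assign_fname all_names → Spec_assign_fname all_names (assign_fname all_names)

-- ===== LEMMAS AND PROOFS =====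

-- proof-side abstraction of B's fold
def pvBestRec (f : String → Nat) : String → List String → String
  | h, [] => h
  | h, n :: t => if f n < f h then pvBestRec f n t else pvBestRec f h t

-- priority of a name relative to a prefix list (structural form of pvPrioGo)
def pvPrioL : List String → String → Nat
  | [], _ => 0
  | p :: ps, n => if PySem.Str.isIn p n then 0 else pvPrioL ps n + 1

theorem pvPrioGo_eq (n : String) (ps : List String) (i : Nat) :
    pvPrioGo n ps i = i + pvPrioL ps n := by
  induction ps generalizing i with
  | nil => simp [pvPrioGo, pvPrioL]
  | cons p ps ih =>
    simp only [pvPrioGo, pvPrioL]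
    split_ifs
    · simp
    · rw [ih]; omega

theorem pvPriority_eq (n : String) : pvPriority n = pvPrioL pvNamesLst n := by
  simp [pvPriority, pvPrioGo_eq]

theorem foldl_best (t : List String) (h : String) :
    (t.foldl pvBestStep (h, pvPriority h)).1 = pvBestRec pvPriority h t := by
  induction t generalizing h with
  | nil => simp [pvBestRec]
  | cons n t ih =>
    simp only [List.foldl_cons, pvBestStep, pvBestRec]
    split_ifs with hc
    · exact ih n
    · exact ih h

theorem pvBestRec_congr (f g : String → Nat) (t : List String) (h : String)
    (hfg : ∀ n ∈ h :: t, f n = g n) :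
    pvBestRec f h t = pvBestRec g h t := by
  induction t generalizing h with
  | nil => simp [pvBestRec]
  | cons n t ih =>
    have hn : f n = g n := hfg n (by simp)
    have hh : f h = g h := hfg h (by simp)
    simp only [pvBestRec, hn, hh]
    split_ifs with hc
    · exact ih n (fun m hm => hfg m (by simp at hm ⊢; tauto))
    · exact ih h (fun m hm => hfg m (by simp at hm ⊢; tauto))

theorem pvBestRec_zero (f : String → Nat) (t : List String) (h : String)
    (hz : f h = 0) : pvBestRec f h t = h := by
  induction t with
  | nil => rfl
  | cons n t ih => simp only [pvBestRec, hz]; simpa using ih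

theorem pvBestRec_shift (g : String → Nat) (t : List String) (h : String) :
    pvBestRec (fun n => g n + 1) h t = pvBestRec g h t := by
  induction t generalizing h with
  | nil => rfl
  | cons n t ih =>
    simp only [pvBestRec, Nat.add_lt_add_iff_right]
    split_ifs
    · exact ih n
    · exact ih h

theorem pvFindName_none (p : String) (l : List String) (hn : pvFindName p l = none) :
    ∀ n ∈ l, PySem.Str.isIn p n = false := by
  induction l with
  | nil => simp
  | cons n t ih =>
    intro m hm
    simp only [pvFindName] at hn
    by_cases hc : PySem.Str.isIn p n = true
    · rw [if_pos hc] at hn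
      exact absurd hn (Option.some_ne_none n)
    · rw [if_neg hc] at hn
      rcases List.mem_cons.1 hm with rfl | hm
      · simpa using hc
      · exact ih hn m hm

theorem pvBestRec_found (p : String) (g : String → Nat) (t : List String) (h n0 : String)
    (hh : PySem.Str.isIn p h = false) (hf : pvFindName p t = some n0) :
    pvBestRec (fun n => if PySem.Str.isIn p n then 0 else g n + 1) h t = n0 := by
  induction t generalizing h with
  | nil => simp [pvFindName] at hf
  | cons n t ih =>
    simp only [pvFindName] at hf
    by_cases hc : PySem.Str.isIn p n = true
    · rw [if_pos hc] at hf
      obtain rfl : n = n0 := by simpa using hf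
      simp only [pvBestRec, hc, if_true, hh, Bool.false_eq_true, if_false]
      rw [if_pos (Nat.succ_pos _)]
      exact pvBestRec_zero _ _ _ (by simp only [hc, if_true])
    · have hc' : PySem.Str.isIn p n = false := by simpa using hc
      rw [if_neg hc] at hf
      simp only [pvBestRec, hc', hh, Bool.false_eq_true, if_false]
      split_ifs
      · exact ih n hc' hf
      · exact ih h hh hf

theorem pvSearch_best (ps : List String) (h : String) (t : List String) :
    (pvSearch ps (h :: t)).getD h = pvBestRec (pvPrioL ps) h t := by
  induction ps with
  | nil =>
    simp only [pvSearch, Option.getD_none]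
    exact (pvBestRec_zero _ _ _ rfl).symm
  | cons p ps ih =>
    simp only [pvSearch]
    cases hf : pvFindName p (h :: t) with
    | some n0 =>
      simp only [Option.getD_some]
      simp only [pvFindName] at hf
      by_cases hh : PySem.Str.isIn p h = true
      · rw [if_pos hh] at hf
        obtain rfl : h = n0 := by simpa using hf
        exact (pvBestRec_zero _ _ _ (by simp only [pvPrioL, hh, if_true])).symm
      · have hh' : PySem.Str.isIn p h = false := by simpa using hh
        rw [if_neg hh] at hf
        have := pvBestRec_found p (pvPrioL ps) t h n0 hh' hf
        refine Eq.trans this.symm ?_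
        exact pvBestRec_congr _ _ t h (fun n _ => by simp [pvPrioL])
    | none =>
      rw [ih]
      have hall := pvFindName_none p (h :: t) hf
      have h1 : pvBestRec (pvPrioL (p :: ps)) h t
          = pvBestRec (fun n => pvPrioL ps n + 1) h t :=
        pvBestRec_congr _ _ t h (fun n hn => by
          simp only [pvPrioL, hall n hn, Bool.false_eq_true, if_false])
      rw [h1, pvBestRec_shift]

theorem preferred_eq (temp : List String) : pvPreferred temp = pvPreferredAlt temp := by
  cases temp with
  | nil => rfl
  | cons h t =>
    cases t with
    | nil => simp [pvPreferred, pvPreferredAlt]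
    | cons n t =>
      simp only [pvPreferred, pvPreferredAlt, List.length_cons]
      rw [if_pos (by omega), foldl_best, pvSearch_best]
      exact pvBestRec_congr _ _ _ _ (fun m _ => (pvPriority_eq m).symm)

theorem foldl_append_map {α β : Type} (f : α → β) (l : List α) (acc : List β) :
    l.foldl (fun a n => a ++ [f n]) acc = acc ++ l.map f := by
  induction l generalizing acc with
  | nil => simp
  | cons n l ih => simp [ih]

-- ===== VERDICT (by name: the statement is the Claim_ definition above) =====
theorem assign_fname_spec : Claim_equal_assign_fname := by
  intro all_names _
  unfold Spec_assign_fname assign_fname assign_fname_alt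
  rw [foldl_append_map (fun names =>(pvPreferred ((((PySem.Str.split? names ",").getD []).foldl
      (fun acc name => acc ++ [pvNormalize name]) []))))]
  simp only [List.nil_append]
  apply List.map_congr_left
  intro names _
  rw [foldl_append_map, List.nil_append, preferred_eq]
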